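-- pv_equiv track=rewrite | github.com/memdreams/Python_Learning | DataStructurePythonCode/exercise1.py | keepChars
-- ===== SOURCE A (Python) =====
-- def keepChars(s):
--     A = 65
--     Z = 90
--     a = 97
--     z = 122
--     for i in s:
--         if (ord(i) > z or ord(i) < A or Z < ord(i) < a) and i != ' ':
--             s = s.replace(i, '')
--     return s
-- ===== SOURCE B (Python) =====
-- import re
--
-- def keepChars(s):
--     return re.sub(r'[^A-Za-z ]', '', s)
-- ===== Notes on version B (the rewrite author's own statement) =====
-- stated objective: faster
-- what changed: Replaces A's loop that calls str.replace once per offending character (each a full pass over the string) with a single regex substitution pass keeping only ASCII letters and spaces.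
import Mathlib
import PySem

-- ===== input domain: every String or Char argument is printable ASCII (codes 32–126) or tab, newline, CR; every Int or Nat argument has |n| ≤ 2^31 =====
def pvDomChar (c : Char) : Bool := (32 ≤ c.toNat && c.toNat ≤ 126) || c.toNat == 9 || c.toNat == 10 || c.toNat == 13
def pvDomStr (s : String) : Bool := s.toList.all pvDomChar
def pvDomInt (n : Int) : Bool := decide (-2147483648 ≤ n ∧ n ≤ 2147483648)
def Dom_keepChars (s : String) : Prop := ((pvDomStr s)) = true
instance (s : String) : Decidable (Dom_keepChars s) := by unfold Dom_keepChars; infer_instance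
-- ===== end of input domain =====

-- B replaces A's per-character str.replace loop (one full pass per offending character)
-- with a single substitution pass keeping only ASCII letters and spaces.

-- ===== PORT A =====
-- A's removal test: (ord(i) > z or ord(i) < A or Z < ord(i) < a) and i != ' '
def keepCharsBad (i : Char) : Bool :=
  (decide ((122 : Int) < (i.toNat : Int)) || decide ((i.toNat : Int) < (65 : Int)) ||
    (decide ((90 : Int) < (i.toNat : Int)) && decide ((i.toNat : Int) < (97 : Int)))) && !(i == ' ')

def keepChars (s : String) : String :=
  -- `for i in s` iterates the ORIGINAL string's characters; `s = s.replace(i, '')` rebinds s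
  s.toList.foldl (fun t i => if keepCharsBad i then PySem.Str.replace t (String.ofList [i]) "" else t) s

-- ===== PORT B =====
-- Source B: re.sub(r'[^A-Za-z ]', '', s) — one pass keeping characters matching [A-Za-z ]
def keepCharsKeep (c : Char) : Bool :=
  (decide (65 ≤ c.toNat) && decide (c.toNat ≤ 90)) ||
  (decide (97 ≤ c.toNat) && decide (c.toNat ≤ 122)) || c == ' '

def keepChars_alt (s : String) : String :=
  String.ofList (s.toList.filter keepCharsKeep)

-- ===== PRECONDITION & SPEC =====
def Spec_keepChars (s : String) (out : String) : Prop := out = keepChars_alt s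
instance (s : String) (out : String) : Decidable (Spec_keepChars s out) := by unfold Spec_keepChars; infer_instance

-- ===== CLAIM (what is proved, stated in full; the proofs are below) =====
def Claim_equal_keepChars : Prop := ∀ (s : String), Dom_keepChars s → Spec_keepChars s (keepChars s)

-- ===== LEMMAS AND PROOFS =====

lemma keepCharsBad_eq_not_keep (c : Char) : keepCharsBad c = !(keepCharsKeep c) := by
  unfold keepCharsBad keepCharsKeep
  by_cases hsp : c = ' '
  · subst hsp; decide
  · have h32 : (c == ' ') = false := by simpa using hsp
    rw [Bool.eq_iff_iff]
    simp [h32]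
    omega

lemma go_single (i : Char) : ∀ (fuel : Nat) (l acc : List Char), l.length ≤ fuel →
    PySem.Chars.replace.go [i] [] fuel l acc = acc.reverse ++ l.filter (fun c => !(c == i)) := by
  intro fuel
  induction fuel with
  | zero => intro l acc h; cases l <;> simp_all [PySem.Chars.replace.go]
  | succ n ih =>
    intro l acc h
    cases l with
    | nil => simp [PySem.Chars.replace.go]
    | cons c t =>
      rw [PySem.Chars.replace.go]
      simp only [List.length_cons, Nat.succ_le_succ_iff] at h
      by_cases hc : c = i
      · subst hc
        simp [List.isPrefixOf, ih t acc h]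
      · have hne : (i == c) = false := by simp [beq_iff_eq]; exact fun e => hc e.symm
        simp [List.isPrefixOf, hne, ih t (c :: acc) h, hc]

lemma replace_single (i : Char) (t : List Char) :
    PySem.Chars.replace t [i] [] = t.filter (fun c => !(c == i)) := by
  rw [PySem.Chars.replace]
  simp [go_single i t.length t [] le_rfl]

lemma fold_inv (l : List Char) : ∀ (u : String),
    (l.foldl (fun t i => if keepCharsBad i then PySem.Str.replace t (String.ofList [i]) "" else t) u).toList
      = u.toList.filter (fun c => !(keepCharsBad c && l.contains c)) := by
  induction l with
  | nil => intro u; simp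
  | cons i l ih =>
    intro u
    simp only [List.foldl_cons]
    by_cases hb : keepCharsBad i
    · rw [hb]
      simp only [if_true, ih]
      have hrep : (PySem.Str.replace u (String.ofList [i]) "").toList
          = u.toList.filter (fun c => !(c == i)) := by
        simp [PySem.Str.replace, replace_single]
      rw [hrep, List.filter_filter]
      apply List.filter_congr
      intro c _
      by_cases hci : c = i
      · subst hci; simp [hb]
      · simp [hci, beq_iff_eq]
    · simp only [hb, if_false, ih]
      apply List.filter_congr
      intro c _
      by_cases hci : c = i
      · subst hci; simp [hb]
      · simp [hci, beq_iff_eq]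

-- ===== VERDICT (by name: the statement is the Claim_ definition above) =====
theorem keepChars_spec : Claim_equal_keepChars := by
  intro s _
  unfold Spec_keepChars keepChars keepChars_alt
  have h := fold_inv s.toList s
  have hlist : (keepChars s).toList = s.toList.filter keepCharsKeep := by
    unfold keepChars
    rw [h]
    apply List.filter_congr
    intro c hc
    simp [List.contains_iff_mem, hc, keepCharsBad_eq_not_keep]
  have := congrArg String.ofList hlist
  simpa [keepChars] using this
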